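-- pv_equiv track=rewrite | github.com/rzaba2137/1B-G2-tech-python | Diagnoza powtórka/Diagnoza powtórka - algorytmy.py | czy_wzglednie_pierwsza_z_24
-- ===== SOURCE A (Python) =====
-- def czy_wzglednie_pierwsza_z_24(liczba):
--     if liczba == 1:
--         return False
--
--     dzielniki_wspolne = [2, 3, 4, 6, 8, 12]
--     for dzielnik in dzielniki_wspolne:
--         if liczba % dzielnik == 0:
--             return False
--
--     return True
-- ===== SOURCE B (Python) =====
-- import math
--
-- def czy_wzglednie_pierwsza_z_24(liczba):
--     return liczba != 1 and math.gcd(liczba, 24) == 1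
-- ===== Notes on version B (the rewrite author's own statement) =====
-- stated objective: simpler
-- what changed: Replaces the fixed divisor-list loop with a single closed-form coprimality test math.gcd(liczba, 24) == 1, keeping A's special case for 1.
import Mathlib
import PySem

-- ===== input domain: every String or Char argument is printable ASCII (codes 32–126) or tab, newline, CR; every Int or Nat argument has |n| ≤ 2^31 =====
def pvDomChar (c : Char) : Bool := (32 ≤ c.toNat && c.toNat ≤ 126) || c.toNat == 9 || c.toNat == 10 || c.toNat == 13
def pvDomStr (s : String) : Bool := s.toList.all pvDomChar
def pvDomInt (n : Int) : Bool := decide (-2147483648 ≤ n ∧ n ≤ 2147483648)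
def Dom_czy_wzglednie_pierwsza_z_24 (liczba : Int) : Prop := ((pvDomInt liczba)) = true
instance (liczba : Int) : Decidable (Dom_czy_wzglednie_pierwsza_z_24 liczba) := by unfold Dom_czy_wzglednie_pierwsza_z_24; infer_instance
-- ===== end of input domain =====

-- B replaces A's fixed divisor-list loop by a single closed-form gcd coprimality test (objective: simpler).


-- ===== PORT A =====
-- the for-loop with early 'return False' is the list-any over the same divisor list
def czy_wzglednie_pierwsza_z_24 (liczba : Int) : Bool :=
  if liczba = 1 then false
  else
    let dzielniki_wspolne : List Int := [2, 3, 4, 6, 8, 12]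
    if dzielniki_wspolne.any (fun dzielnik => PySem.Int.mod liczba dzielnik == 0) then false
    else true

-- ===== PORT B =====
-- math.gcd(a, b) on ints is Int.gcd (gcd of absolute values, a Nat)
def czy_wzglednie_pierwsza_z_24_alt (liczba : Int) : Bool :=
  liczba != 1 && Int.gcd liczba 24 == 1

-- ===== PRECONDITION & SPEC =====
def Spec_czy_wzglednie_pierwsza_z_24 (liczba : Int) (out : Bool) : Prop := out = czy_wzglednie_pierwsza_z_24_alt liczba
instance (liczba : Int) (out : Bool) : Decidable (Spec_czy_wzglednie_pierwsza_z_24 liczba out) := by unfold Spec_czy_wzglednie_pierwsza_z_24; infer_instance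

-- ===== CLAIM (what is proved, stated in full; the proofs are below) =====
def Claim_equal_czy_wzglednie_pierwsza_z_24 : Prop := ∀ (liczba : Int), Dom_czy_wzglednie_pierwsza_z_24 liczba → Spec_czy_wzglednie_pierwsza_z_24 liczba (czy_wzglednie_pierwsza_z_24 liczba)

-- ===== LEMMAS AND PROOFS =====

-- coprimality with 24 over a residue: finite check
lemma gcd24_residue (r : Nat) (h : r < 24) :
    Nat.gcd r 24 = 1 ↔ ¬ 2 ∣ r ∧ ¬ 3 ∣ r := by
  interval_cases r <;> decide

lemma gcd24_nat (m : Nat) : Nat.gcd m 24 = 1 ↔ ¬ 2 ∣ m ∧ ¬ 3 ∣ m := by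
  have h1 : Nat.gcd m 24 = Nat.gcd (m % 24) 24 := by
    rw [Nat.gcd_comm m 24, Nat.gcd_rec 24 m, Nat.gcd_comm]
  have h2 : (2 ∣ m % 24 ↔ 2 ∣ m) := by omega
  have h3 : (3 ∣ m % 24 ↔ 3 ∣ m) := by omega
  rw [h1, gcd24_residue (m % 24) (Nat.mod_lt m (by norm_num)), h2, h3]

lemma gcd24_int (n : Int) : (Int.gcd n 24 = 1) ↔ ¬ (2:Int) ∣ n ∧ ¬ (3:Int) ∣ n := by
  have h2 : ((2:Int) ∣ n ↔ 2 ∣ n.natAbs) := by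
    constructor
    · intro h; exact Int.natAbs_dvd_natAbs.mpr h
    · intro h; exact Int.natAbs_dvd_natAbs.mp h
  have h3 : ((3:Int) ∣ n ↔ 3 ∣ n.natAbs) := by
    constructor
    · intro h; exact Int.natAbs_dvd_natAbs.mpr h
    · intro h; exact Int.natAbs_dvd_natAbs.mp h
  rw [h2, h3]
  exact gcd24_nat n.natAbs

-- ===== VERDICT (by name: the statement is the Claim_ definition above) =====
theorem czy_wzglednie_pierwsza_z_24_spec : Claim_equal_czy_wzglednie_pierwsza_z_24 := by
  intro n _
  unfold Spec_czy_wzglednie_pierwsza_z_24 czy_wzglednie_pierwsza_z_24 czy_wzglednie_pierwsza_z_24_alt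
  by_cases h1 : n = 1
  · simp [h1]
  · rw [Bool.eq_iff_iff]
    simp only [if_neg h1]
    split_ifs with h
    · simp only [false_iff, Bool.and_eq_true, bne_iff_ne, beq_iff_eq, ne_eq, not_and]
      intro _ hg
      rcases (gcd24_int n).mp hg with ⟨h2, h3⟩
      simp only [List.any_cons, List.any_nil, Bool.or_eq_true, beq_iff_eq,
        PySem.Int.mod_eq_zero_iff_dvd, Bool.or_false] at h
      rcases h with h|h|h|h|h|h
      · exact h2 h
      · exact h3 h
      · exact h2 (dvd_trans ⟨2, rfl⟩ h)
      · exact h2 (dvd_trans ⟨3, rfl⟩ h)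
      · exact h2 (dvd_trans ⟨4, rfl⟩ h)
      · exact h2 (dvd_trans ⟨6, rfl⟩ h)
    · simp only [true_iff, Bool.and_eq_true, bne_iff_ne, beq_iff_eq, ne_eq]
      simp only [List.any_cons, List.any_nil, Bool.or_eq_true, beq_iff_eq,
        PySem.Int.mod_eq_zero_iff_dvd, Bool.or_false, not_or] at h
      exact ⟨h1, (gcd24_int n).mpr ⟨h.1, h.2.1⟩⟩
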